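-- pv_equiv track=rewrite | github.com/Zysishuiyears/Graph-Theory-B-coloring-of-Cartesian-products | src/legacy/code/general_product_search_20260315_pre_decide_perf.py | canonical_relabel_key
-- ===== SOURCE A (Python) =====
-- from typing import List, Tuple, Optional, Set, Dict
--
-- def canonical_relabel_key(colors: List[int]) -> Tuple[int, ...]:
--     mp = {}
--     nxt = 0
--     out = []
--     for x in colors:
--         if x not in mp:
--             mp[x] = nxt
--             nxt += 1
--         out.append(mp[x])
--     return tuple(out)
-- ===== SOURCE B (Python) =====
-- def canonical_relabel_key(colors):
--     # Stateless per-element formula: the canonical label of x is the number of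
--     # distinct colors appearing strictly before the first occurrence of x.
--     return tuple(len(set(colors[:colors.index(x)])) for x in colors)
-- ===== Notes on version B (the rewrite author's own statement) =====
-- stated objective: alternative
-- what changed: Replaces A's single stateful loop (incrementally grown relabeling dict plus counter) by a stateless per-element closed form: each label is computed independently as the number of distinct colors before that color's first occurrence, using index/slice/set with no mapping table and no accumulated state.
import Mathlib
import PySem

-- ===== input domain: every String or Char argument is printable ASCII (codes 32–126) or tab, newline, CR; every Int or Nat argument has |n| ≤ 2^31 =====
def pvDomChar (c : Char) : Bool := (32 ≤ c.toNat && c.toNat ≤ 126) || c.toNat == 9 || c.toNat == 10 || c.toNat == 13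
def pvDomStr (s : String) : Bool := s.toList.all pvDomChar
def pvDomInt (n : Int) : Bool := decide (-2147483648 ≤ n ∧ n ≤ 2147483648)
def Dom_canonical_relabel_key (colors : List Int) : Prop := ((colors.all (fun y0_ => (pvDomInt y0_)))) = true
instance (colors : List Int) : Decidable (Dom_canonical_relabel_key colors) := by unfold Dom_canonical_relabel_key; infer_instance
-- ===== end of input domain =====

-- B replaces A's single stateful loop (incrementally grown relabeling dict plus counter) by a
-- stateless per-element closed form: label(x) = number of distinct colors before x's first occurrence.

-- ===== PORT A =====
-- A: one loop, state (mp, nxt, out); mp grows lazily on first sight of a color.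
def canonical_relabel_key (colors : List Int) : List Int :=
  (colors.foldl
    (fun (st : PySem.Dict Int Int × Int × List Int) x =>
      let mp := st.1
      let nxt := st.2.1
      let out := st.2.2
      if mp.contains x then (mp, nxt, out ++ [mp.getD x 0])
      else (mp.insert x nxt, nxt + 1, out ++ [(mp.insert x nxt).getD x 0]))
    (PySem.Dict.empty, 0, [])).2.2

-- ===== PORT B =====
-- B: tuple(len(set(colors[:colors.index(x)])) for x in colors); no map, no state.
-- colors.index(x) cannot raise here since x is drawn from colors, so the `none`
-- branch of index? is unreachable.
def canonical_relabel_key_alt (colors : List Int) : List Int :=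
  colors.map (fun x =>
    match PySem.List.index? colors x with
    | some j => ((PySem.Set.ofList (PySem.List.slice colors none (some (j : Int)))).length : Int)
    | none => 0)

-- ===== PRECONDITION & SPEC =====
def Spec_canonical_relabel_key (colors : List Int) (out : List Int) : Prop := out = canonical_relabel_key_alt colors
instance (colors : List Int) (out : List Int) : Decidable (Spec_canonical_relabel_key colors out) := by unfold Spec_canonical_relabel_key; infer_instance

-- ===== CLAIM (what is proved, stated in full; the proofs are below) =====
def Claim_equal_canonical_relabel_key : Prop := ∀ (colors : List Int), Dom_canonical_relabel_key colors → Spec_canonical_relabel_key colors (canonical_relabel_key colors)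

-- ===== LEMMAS AND PROOFS =====

-- The table built from `enumerate l s` does not touch keys outside l.
theorem pv_build_get?_of_not_mem (l : List Int) (s : Int) (d : PySem.Dict Int Int)
    (x : Int) (hx : x ∉ l) :
    ((PySem.List.enumerate l s).foldl (fun d p => d.insert p.2 p.1) d).get? x = d.get? x := by
  induction l generalizing s d with
  | nil => simp [PySem.List.enumerate_nil]
  | cons y ys ih =>
    simp only [PySem.List.enumerate_cons, List.foldl_cons]
    rw [ih _ _ (fun h => hx (List.mem_cons_of_mem _ h))]
    have hne : x ≠ y := fun (h : x = y) => hx (h ▸ List.mem_cons_self)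
    exact PySem.Dict.get?_insert_of_ne _ _ hne

-- Lookup in the enumerate-built table is first-appearance index (offset by the start).
theorem pv_build_getD (l : List Int) (s : Int) (d : PySem.Dict Int Int)
    (x : Int) (hn : l.Nodup) (hx : x ∈ l) :
    ((PySem.List.enumerate l s).foldl (fun d p => d.insert p.2 p.1) d).getD x 0
      = s + (l.idxOf x : Int) := by
  induction l generalizing s d with
  | nil => cases hx
  | cons y ys ih =>
    simp only [PySem.List.enumerate_cons, List.foldl_cons]
    by_cases hxy : x = y
    · subst hxy
      have hnot : x ∉ ys := (List.nodup_cons.mp hn).1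
      rw [PySem.Dict.getD_eq_get?_getD, pv_build_get?_of_not_mem ys (s+1) _ x hnot,
        PySem.Dict.get?_insert_self]
      simp
    · have hmem : x ∈ ys := by
        cases hx with
        | head => exact absurd rfl hxy
        | tail _ h => exact h
      rw [ih (s + 1) _ (List.nodup_cons.mp hn).2 hmem,
        List.idxOf_cons_ne _ (by simpa using Ne.symm hxy)]
      push_cast
      ring

-- `Set.update seen cs` only appends to `seen`.
theorem pv_update_prefix (cs seen : List Int) :
    ∃ t, PySem.Set.update seen cs = seen ++ t := by
  induction cs generalizing seen with
  | nil => exact ⟨[], by simp [PySem.Set.update]⟩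
  | cons x cs ih =>
    have hstep : PySem.Set.update seen (x :: cs) = PySem.Set.update (PySem.Set.add seen x) cs := by
      simp [PySem.Set.update]
    by_cases hx : x ∈ seen
    · have : PySem.Set.add seen x = seen := by
        simp [PySem.Set.add, PySem.Set.contains, hx]
      obtain ⟨t, ht⟩ := ih (PySem.Set.add seen x)
      exact ⟨t, by rw [hstep, ht, this]⟩
    · have : PySem.Set.add seen x = seen ++ [x] := by
        simp [PySem.Set.add, PySem.Set.contains, hx]
      obtain ⟨t, ht⟩ := ih (PySem.Set.add seen x)
      exact ⟨[x] ++ t, by rw [hstep, ht, this, List.append_assoc]⟩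

-- First-appearance index of a member of `seen` is stable under later appends.
theorem pv_idxOf_update_of_mem (cs seen : List Int) (x : Int) (hx : x ∈ seen) :
    (PySem.Set.update seen cs).idxOf x = seen.idxOf x := by
  obtain ⟨t, ht⟩ := pv_update_prefix cs seen
  rw [ht, List.idxOf_append_of_mem hx]

-- The enumerate-built table over `seen` (start 0), used to characterise A's loop state.
def pvTable (seen : List Int) : PySem.Dict Int Int :=
  (PySem.List.enumerate seen).foldl (fun d p => d.insert p.2 p.1) PySem.Dict.empty

theorem pv_keys_table (seen : List Int) (hn : seen.Nodup) : (pvTable seen).keys = seen := by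
  unfold pvTable
  rw [PySem.Dict.keys_foldl_insert_key (key := fun (p : Int × Int) => p.2)]
  simp [PySem.List.map_snd_enumerate, PySem.Set.update_nil_left,
    PySem.Set.ofList_eq_self_of_nodup seen hn]

theorem pv_contains_table (seen : List Int) (hn : seen.Nodup) (x : Int) :
    (pvTable seen).contains x = decide (x ∈ seen) := by
  rw [PySem.Dict.contains_eq_decide_mem_keys, pv_keys_table seen hn]

theorem pv_getD_table (seen : List Int) (x : Int) (hn : seen.Nodup) (hx : x ∈ seen) :
    (pvTable seen).getD x 0 = ((seen.idxOf x : Nat) : Int) := by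
  unfold pvTable
  rw [pv_build_getD seen 0 _ x hn hx]
  simp

theorem pv_table_snoc (seen : List Int) (x : Int) :
    pvTable (seen ++ [x]) = (pvTable seen).insert x (seen.length : Int) := by
  unfold pvTable
  rw [PySem.List.enumerate_append, List.foldl_append]
  simp [PySem.List.enumerate_cons]

-- The invariant of A's loop: starting from the table of a Nodup `seen`, the loop emits
-- `out` followed by the first-appearance indices taken in the final dedup list.
theorem pv_A_loop (cs : List Int) (seen : List Int) (out : List Int) (hn : seen.Nodup) :
    (cs.foldl
      (fun (st : PySem.Dict Int Int × Int × List Int) x =>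
        let mp := st.1
        let nxt := st.2.1
        let out := st.2.2
        if mp.contains x then (mp, nxt, out ++ [mp.getD x 0])
        else (mp.insert x nxt, nxt + 1, out ++ [(mp.insert x nxt).getD x 0]))
      (pvTable seen, (seen.length : Int), out)).2.2
    = out ++ cs.map (fun x => (((PySem.Set.update seen cs).idxOf x : Nat) : Int)) := by
  induction cs generalizing seen out with
  | nil => simp [PySem.Set.update]
  | cons x cs ih =>
    have hstep : PySem.Set.update seen (x :: cs) = PySem.Set.update (PySem.Set.add seen x) cs := by
      simp [PySem.Set.update]
    simp only [List.foldl_cons, List.map_cons]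
    by_cases hx : x ∈ seen
    · have hadd : PySem.Set.add seen x = seen := by
        simp [PySem.Set.add, PySem.Set.contains, hx]
      rw [show ((if (pvTable seen).contains x then
            (pvTable seen, (seen.length : Int), out ++ [(pvTable seen).getD x 0])
          else ((pvTable seen).insert x (seen.length : Int), (seen.length : Int) + 1,
            out ++ [((pvTable seen).insert x (seen.length : Int)).getD x 0]))
          = (pvTable seen, (seen.length : Int), out ++ [(pvTable seen).getD x 0])) from by
        rw [pv_contains_table seen hn x]; simp [hx]]
      rw [ih seen _ hn, hstep, hadd]
      rw [pv_getD_table seen x hn hx]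
      rw [pv_idxOf_update_of_mem cs seen x hx]
      simp
    · have hadd : PySem.Set.add seen x = seen ++ [x] := by
        simp [PySem.Set.add, PySem.Set.contains, hx]
      have hn' : (seen ++ [x]).Nodup := by
        rw [List.nodup_append]
        refine ⟨hn, List.nodup_singleton x, ?_⟩
        intro a ha b hb
        rw [List.mem_singleton] at hb
        subst hb
        exact fun h => hx (h ▸ ha)
      rw [show ((if (pvTable seen).contains x then
            (pvTable seen, (seen.length : Int), out ++ [(pvTable seen).getD x 0])
          else ((pvTable seen).insert x (seen.length : Int), (seen.length : Int) + 1,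
            out ++ [((pvTable seen).insert x (seen.length : Int)).getD x 0]))
          = ((pvTable seen).insert x (seen.length : Int), (seen.length : Int) + 1,
            out ++ [((pvTable seen).insert x (seen.length : Int)).getD x 0])) from by
        rw [pv_contains_table seen hn x]; simp [hx]]
      rw [← pv_table_snoc seen x]
      have hlen : ((seen.length : Int) + 1) = ((seen ++ [x]).length : Int) := by
        simp
      rw [hlen, ih (seen ++ [x]) _ hn', hstep, hadd]
      have hgd : (pvTable (seen ++ [x])).getD x 0 = ((seen.length : Nat) : Int) := by
        rw [pv_table_snoc seen x, PySem.Dict.getD_eq_get?_getD, PySem.Dict.get?_insert_self]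
        simp
      rw [hgd]
      have hidx : (PySem.Set.update (seen ++ [x]) cs).idxOf x = seen.length := by
        rw [pv_idxOf_update_of_mem cs (seen ++ [x]) x (by simp)]
        rw [List.idxOf_append_of_notMem hx]
        simp
      rw [hidx]
      simp

-- B side: the first-appearance index of x inside the running dedup equals the size of the
-- dedup of the prefix of the traversal strictly before x's first occurrence.
theorem pv_idxOf_update_eq_len (pre post seen : List Int) (x : Int)
    (hxs : x ∉ seen) (hxp : x ∉ pre) :
    (PySem.Set.update seen (pre ++ x :: post)).idxOf x = (PySem.Set.update seen pre).length := by
  induction pre generalizing seen with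
  | nil =>
    have hstep : PySem.Set.update seen (x :: post) = PySem.Set.update (PySem.Set.add seen x) post := by
      simp [PySem.Set.update]
    have hadd : PySem.Set.add seen x = seen ++ [x] := by
      simp [PySem.Set.add, PySem.Set.contains, hxs]
    simp only [List.nil_append, hstep, hadd]
    rw [pv_idxOf_update_of_mem post (seen ++ [x]) x (by simp),
      List.idxOf_append_of_notMem hxs]
    simp [PySem.Set.update]
  | cons p pre ih =>
    have hxp' : x ∉ pre := fun h => hxp (List.mem_cons_of_mem _ h)
    have hxnep : x ≠ p := fun h => hxp (h ▸ List.mem_cons_self)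
    have hstep : ∀ rest, PySem.Set.update seen (p :: rest) = PySem.Set.update (PySem.Set.add seen p) rest := by
      intro rest; simp [PySem.Set.update]
    have hxs' : x ∉ PySem.Set.add seen p := by
      by_cases hp : p ∈ seen
      · simpa [PySem.Set.add, PySem.Set.contains, hp] using hxs
      · simp [PySem.Set.add, PySem.Set.contains, hp]
        exact ⟨hxs, hxnep⟩
    rw [List.cons_append, hstep (pre ++ x :: post), hstep pre]
    exact ih (PySem.Set.add seen p) hxs' hxp'

-- x does not occur in the prefix strictly before its first occurrence.
theorem pv_not_mem_take_idxOf (l : List Int) (x : Int) : x ∉ l.take (l.idxOf x) := by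
  intro h
  obtain ⟨i, hi, hx⟩ := List.getElem_of_mem h
  simp only [List.length_take, lt_inf_iff] at hi
  rw [List.getElem_take] at hx
  have hne := List.not_of_lt_findIdx (p := (· == x)) (xs := l) (by simpa [List.idxOf] using hi.1)
  rw [beq_eq_false_iff_ne] at hne
  exact hne hx

-- Per element of colors, B's formula equals the first-appearance index in the full dedup.
theorem pv_B_elem (colors : List Int) (x : Int) (hx : x ∈ colors) :
    (match PySem.List.index? colors x with
      | some j => ((PySem.Set.ofList (PySem.List.slice colors none (some (j : Int)))).length : Int)
      | none => 0)
    = (((PySem.List.dedup colors).idxOf x : Nat) : Int) := by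
  set j := colors.idxOf x with hj
  have hjl : j < colors.length := List.idxOf_lt_length_of_mem hx
  have hidx : PySem.List.index? colors x = some j := by
    rw [PySem.List.index?_eq_idxOf?, List.idxOf?_eq_some_iff]
    refine ⟨hjl, List.getElem_idxOf hjl, fun k hk => ?_⟩
    have hk2 : k < List.idxOf x colors := hj ▸ hk
    have := List.not_of_lt_findIdx (p := (· == x)) (xs := colors) (i := k) (by simpa [List.idxOf] using hk2)
    simpa using this
  rw [hidx]
  simp only [PySem.List.slice_to_natCast]
  have hsplit : colors = colors.take j ++ x :: colors.drop (j + 1) := by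
    conv_lhs => rw [← List.take_append_drop j colors]
    rw [List.drop_eq_getElem_cons hjl, List.getElem_idxOf hjl]
  have hnt : x ∉ colors.take j := pv_not_mem_take_idxOf colors x
  have key : (PySem.List.dedup colors).idxOf x = (PySem.Set.ofList (colors.take j)).length := by
    rw [PySem.List.dedup_eq_ofList, ← PySem.Set.update_nil_left colors,
      ← PySem.Set.update_nil_left (colors.take j)]
    conv_lhs => rw [hsplit]
    exact pv_idxOf_update_eq_len (colors.take j) (colors.drop (j + 1)) [] x (by simp) hnt
  rw [key]

-- ===== VERDICT (by name: the statement is the Claim_ definition above) =====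
theorem canonical_relabel_key_spec : Claim_equal_canonical_relabel_key := by
  intro colors _
  unfold Spec_canonical_relabel_key canonical_relabel_key canonical_relabel_key_alt
  have h0 : pvTable ([] : List Int) = PySem.Dict.empty := rfl
  have hA := pv_A_loop colors [] [] (List.nodup_nil)
  rw [h0] at hA
  simp only [List.length_nil, Int.natCast_zero] at hA
  rw [hA, List.nil_append]
  rw [PySem.Set.update_nil_left, ← PySem.List.dedup_eq_ofList]
  apply List.map_congr_left
  intro x hx
  exact (pv_B_elem colors x hx).symm
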